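-- pv_equiv track=rewrite | github.com/SHIVAKUMAR-KS/Python | ClassWork/tuple/one.py | total_money_saved
-- ===== SOURCE A (Python) =====
-- def total_money_saved(n):
--     total = 0
--     current_deposit = 1
--     for day in range(1, n + 1):
--         total += current_deposit
--         if day % 7 == 0:
--             current_deposit += 1
--     return total
-- ===== SOURCE B (Python) =====
-- def total_money_saved(n):
--     # Closed form: w full weeks of deposits 1..w, plus r days at deposit w+1.
--     if n <= 0:
--         return 0
--     w, r = divmod(n, 7)
--     return 7 * w * (w + 1) // 2 + r * (w + 1)
-- ===== Notes on version B (the rewrite author's own statement) =====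
-- stated objective: faster
-- what changed: Replaces the day-by-day loop with a closed-form arithmetic-series formula over full weeks plus the partial week.
import Mathlib
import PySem

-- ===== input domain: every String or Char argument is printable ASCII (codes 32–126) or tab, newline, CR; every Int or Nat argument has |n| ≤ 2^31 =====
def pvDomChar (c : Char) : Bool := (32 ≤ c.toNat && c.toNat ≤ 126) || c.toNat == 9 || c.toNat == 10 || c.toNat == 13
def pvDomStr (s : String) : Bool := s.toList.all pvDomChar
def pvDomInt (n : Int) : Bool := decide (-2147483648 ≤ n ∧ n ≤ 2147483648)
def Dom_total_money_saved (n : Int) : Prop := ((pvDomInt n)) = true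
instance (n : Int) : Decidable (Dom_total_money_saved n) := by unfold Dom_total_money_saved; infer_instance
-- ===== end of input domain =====

-- B replaces A's day-by-day loop with a closed-form arithmetic series over full weeks plus the partial week (O(1) vs O(n)).


-- ===== PORT A =====
def tmsStep (s : Int × Int) (day : Int) : Int × Int :=
  (s.1 + s.2, if PySem.Int.mod day 7 = 0 then s.2 + 1 else s.2)

def total_money_saved (n : Int) : Int :=
  ((PySem.List.pyRange 1 (n + 1) 1).foldl tmsStep (0, 1)).1

-- ===== PORT B =====
def total_money_saved_alt (n : Int) : Int :=
  if n ≤ 0 then 0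
  else
    let w := PySem.Int.floordiv n 7
    let r := PySem.Int.mod n 7
    PySem.Int.floordiv (7 * w * (w + 1)) 2 + r * (w + 1)

-- ===== PRECONDITION & SPEC =====
def Spec_total_money_saved (n : Int) (out : Int) : Prop := out = total_money_saved_alt n
instance (n : Int) (out : Int) : Decidable (Spec_total_money_saved n out) := by unfold Spec_total_money_saved; infer_instance

-- ===== CLAIM (what is proved, stated in full; the proofs are below) =====
def Claim_equal_total_money_saved : Prop := ∀ (n : Int), Dom_total_money_saved n → Spec_total_money_saved n (total_money_saved n)

-- ===== LEMMAS AND PROOFS =====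

/-- triangular number w*(w+1)/2 -/
def tmsTri (w : Nat) : Nat := w * (w + 1) / 2

/-- total after m days, closed form over Nat -/
def tmsT (m : Nat) : Nat := 7 * tmsTri (m / 7) + (m % 7) * (m / 7 + 1)

theorem tmsTri_succ (w : Nat) : tmsTri (w + 1) = tmsTri w + (w + 1) := by
  unfold tmsTri
  have h : (w + 1) * (w + 1 + 1) = w * (w + 1) + (w + 1) * 2 := by ring
  rw [h, Nat.add_mul_div_right _ _ (by omega : 0 < 2)]

theorem tmsT_succ (m : Nat) : tmsT (m + 1) = tmsT m + (m / 7 + 1) := by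
  unfold tmsT
  by_cases h : m % 7 = 6
  · have h1 : (m + 1) / 7 = m / 7 + 1 := by omega
    have h2 : (m + 1) % 7 = 0 := by omega
    rw [h1, h2, h, tmsTri_succ]
    set t := tmsTri (m / 7)
    omega
  · have h1 : (m + 1) / 7 = m / 7 := by omega
    have h2 : (m + 1) % 7 = m % 7 + 1 := by omega
    rw [h1, h2]
    have hx : (m % 7 + 1) * (m / 7 + 1) = (m % 7) * (m / 7 + 1) + (m / 7 + 1) := by ring
    rw [hx]; omega

theorem tmsLoop (m : Nat) :
    (PySem.List.pyRange 1 ((m : Int) + 1) 1).foldl tmsStep (0, 1)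
      = ((tmsT m : Int), ((m / 7 : Nat) : Int) + 1) := by
  induction m with
  | zero => simp [PySem.List.pyRange_one_eq_nil, tmsT, tmsTri]
  | succ m ih =>
    have hle : (1 : Int) ≤ (m : Int) + 1 := by omega
    have hcast : ((m + 1 : Nat) : Int) + 1 = ((m : Int) + 1) + 1 := by push_cast; ring
    rw [hcast, PySem.List.pyRange_one_succ_right hle, List.foldl_append, ih]
    simp only [List.foldl_cons, List.foldl_nil, tmsStep]
    have hmod : PySem.Int.mod ((m : Int) + 1) 7 = (((m + 1) % 7 : Nat) : Int) := by
      exact_mod_cast PySem.Int.mod_natCast (m + 1) 7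
    rw [hmod]
    by_cases h : (m + 1) % 7 = 0
    · have h1 : (m + 1) / 7 = m / 7 + 1 := by omega
      rw [if_pos (show (((m + 1) % 7 : Nat) : Int) = 0 by exact_mod_cast h)]
      refine Prod.ext ?_ ?_
      · show ((tmsT m : Nat) : Int) + (((m / 7 : Nat) : Int) + 1) = ((tmsT (m + 1) : Nat) : Int)
        rw [tmsT_succ m]; push_cast; ring
      · show ((m / 7 : Nat) : Int) + 1 + 1 = (((m + 1) / 7 : Nat) : Int) + 1
        rw [h1]; push_cast; ring
    · have h1 : (m + 1) / 7 = m / 7 := by omega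
      rw [if_neg (show ¬ ((((m + 1) % 7 : Nat) : Int) = 0) by exact_mod_cast h)]
      refine Prod.ext ?_ ?_
      · show ((tmsT m : Nat) : Int) + (((m / 7 : Nat) : Int) + 1) = ((tmsT (m + 1) : Nat) : Int)
        rw [tmsT_succ m]; push_cast; ring
      · show ((m / 7 : Nat) : Int) + 1 = (((m + 1) / 7 : Nat) : Int) + 1
        rw [h1]

theorem tmsAlt_eq (m : Nat) (hm : 0 < m) : total_money_saved_alt (m : Int) = (tmsT m : Int) := by
  unfold total_money_saved_alt
  rw [if_neg (show ¬ ((m : Int) ≤ 0) by exact_mod_cast Nat.not_le.mpr hm)]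
  show PySem.Int.floordiv (7 * PySem.Int.floordiv (m : Int) 7 * (PySem.Int.floordiv (m : Int) 7 + 1)) 2
      + PySem.Int.mod (m : Int) 7 * (PySem.Int.floordiv (m : Int) 7 + 1) = ((tmsT m : Nat) : Int)
  have hw : PySem.Int.floordiv (m : Int) 7 = ((m / 7 : Nat) : Int) := by
    exact_mod_cast PySem.Int.floordiv_natCast m 7
  have hr : PySem.Int.mod (m : Int) 7 = ((m % 7 : Nat) : Int) := by
    exact_mod_cast PySem.Int.mod_natCast m 7
  rw [hw, hr]
  have h1 : (7 : Int) * ((m / 7 : Nat) : Int) * (((m / 7 : Nat) : Int) + 1)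
      = ((7 * (m / 7) * (m / 7 + 1) : Nat) : Int) := by push_cast; ring
  rw [h1]
  have h3 : PySem.Int.floordiv ((7 * (m / 7) * (m / 7 + 1) : Nat) : Int) 2
      = ((7 * (m / 7) * (m / 7 + 1) / 2 : Nat) : Int) := by
    exact_mod_cast PySem.Int.floordiv_natCast (7 * (m / 7) * (m / 7 + 1)) 2
  rw [h3]
  have h2 : 7 * (m / 7) * (m / 7 + 1) / 2 = 7 * tmsTri (m / 7) := by
    unfold tmsTri
    have hev : 2 ∣ (m / 7) * (m / 7 + 1) := (Nat.even_mul_succ_self (m / 7)).two_dvd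
    rw [Nat.mul_assoc, Nat.mul_div_assoc 7 hev]
  rw [h2]
  unfold tmsT
  push_cast
  ring

-- ===== VERDICT (by name: the statement is the Claim_ definition above) =====
theorem total_money_saved_spec : Claim_equal_total_money_saved := by
  intro n _
  unfold Spec_total_money_saved
  by_cases h : n ≤ 0
  · unfold total_money_saved total_money_saved_alt
    rw [PySem.List.pyRange_one_eq_nil (by omega), if_pos h]
    rfl
  · obtain ⟨m, rfl⟩ : ∃ m : Nat, n = (m : Int) :=
      ⟨n.toNat, by omega⟩
    have hm : 0 < m := by omega
    unfold total_money_saved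
    rw [tmsLoop m, tmsAlt_eq m hm]
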